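-- pv_equiv track=rewrite | github.com/DSA164/Flashcards | items_streamlit.py | welcome
-- ===== SOURCE A (Python) =====
-- COLORS = ["#ff5555", "#ff9e55", "#f1fa8c",
--           "#50fa7b", "#57c7ff", "#bd93f9", "#ff79c6"]
--
-- def welcome(html_text: str) -> str:
--     """Renvoie l'ASCII-art coloré caractère par caractère."""
--     result, idx = [], 0
--     for ch in html_text:
--         if ch == "\n":                    # nouvelle ligne → balise HTML <br>
--             result.append("<br>")
--         else:
--             color = COLORS[idx % len(COLORS)]
--             # &nbsp; pour préserver les espaces, sinon le dessin s'écrase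
--             ch_html = "&nbsp;" if ch == " " else ch
--             result.append(f"<span style='color:{color}'>{ch_html}</span>")
--             idx += 1
--     return "".join(result)
-- ===== SOURCE B (Python) =====
-- COLORS = ["#ff5555", "#ff9e55", "#f1fa8c",
--           "#50fa7b", "#57c7ff", "#bd93f9", "#ff79c6"]
--
-- def welcome(html_text: str) -> str:
--     """Renvoie l'ASCII-art coloré caractère par caractère."""
--     lines = html_text.split('\n')
--     rendered, idx = [], 0
--     for line in lines:
--         parts = []
--         for ch in line:
--             color = COLORS[idx % len(COLORS)]
--             ch_html = "&nbsp;" if ch == " " else ch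
--             parts.append(f"<span style='color:{color}'>{ch_html}</span>")
--             idx += 1
--         rendered.append("".join(parts))
--     return "<br>".join(rendered)
-- ===== Notes on version B (the rewrite author's own statement) =====
-- stated objective: alternative
-- what changed: B splits the text into lines first and renders each line with an inner character loop threading one global color index, then joins the per-line strings with the HTML break tag, instead of A's single character loop with a per-character newline branch.
import Mathlib
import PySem

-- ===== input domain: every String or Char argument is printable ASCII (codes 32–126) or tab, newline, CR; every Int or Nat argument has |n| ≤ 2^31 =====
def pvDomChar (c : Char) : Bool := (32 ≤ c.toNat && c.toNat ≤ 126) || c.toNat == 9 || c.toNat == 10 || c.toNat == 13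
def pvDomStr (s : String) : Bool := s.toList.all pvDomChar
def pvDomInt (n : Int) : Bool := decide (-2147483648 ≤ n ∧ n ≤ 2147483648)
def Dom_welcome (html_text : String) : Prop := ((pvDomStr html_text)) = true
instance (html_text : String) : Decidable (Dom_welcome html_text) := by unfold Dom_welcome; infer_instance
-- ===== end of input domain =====

-- B restructures A's single char loop into split('\n') + per-line char loops with one global
-- color index, joined by '<br>' (objective: alternative decomposition, same cost).

def pvColors : List (List Char) :=
  ["#ff5555".toList, "#ff9e55".toList, "#f1fa8c".toList,
   "#50fa7b".toList, "#57c7ff".toList, "#bd93f9".toList, "#ff79c6".toList]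

-- ===== PORT A =====
-- one span: f"<span style='color:{COLORS[idx % len(COLORS)]}'>{ch_html}</span>"
def pvSpanA (idx : Nat) (c : Char) : List Char :=
  "<span style='color:".toList ++ pvColors.getD (idx % pvColors.length) []
    ++ "'>".toList ++ (if c = ' ' then "&nbsp;".toList else [c]) ++ "</span>".toList

-- the loop over the characters, accumulating the joined pieces and the color index
def pvGoA (idx : Nat) : List Char → List Char
  | [] => []
  | c :: cs =>
      if c = '\n' then "<br>".toList ++ pvGoA idx cs
      else pvSpanA idx c ++ pvGoA (idx + 1) cs

def welcome (html_text : String) : String := String.mk (pvGoA 0 html_text.toList)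

-- ===== PORT B =====
def pvSpanB (idx : Nat) (c : Char) : List Char :=
  "<span style='color:".toList ++ pvColors.getD (idx % pvColors.length) []
    ++ "'>".toList ++ (if c = ' ' then "&nbsp;".toList else [c]) ++ "</span>".toList

-- html_text.split('\n')  (single-char separator; Python-exact: '' splits to [''])
def pvSplitNl : List Char → List (List Char)
  | [] => [[]]
  | c :: cs =>
      if c = '\n' then [] :: pvSplitNl cs
      else match pvSplitNl cs with
           | [] => [[c]]           -- unreachable: split never returns []
           | l :: ls => (c :: l) :: ls

-- inner loop: the joined span string of one line, from color index idx
def pvLineB (idx : Nat) : List Char → List Char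
  | [] => []
  | c :: cs => pvSpanB idx c ++ pvLineB (idx + 1) cs

-- outer loop over the lines, threading the global index
def pvLinesB (idx : Nat) : List (List Char) → List (List Char)
  | [] => []
  | l :: ls => pvLineB idx l :: pvLinesB (idx + l.length) ls

-- '<br>'.join(rendered)
def pvJoinBr : List (List Char) → List Char
  | [] => []
  | [l] => l
  | l :: ls => l ++ "<br>".toList ++ pvJoinBr ls

def welcome_alt (html_text : String) : String :=
  String.mk (pvJoinBr (pvLinesB 0 (pvSplitNl html_text.toList)))

-- ===== PRECONDITION & SPEC =====
def Spec_welcome (html_text : String) (out : String) : Prop := out = welcome_alt html_text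
instance (html_text : String) (out : String) : Decidable (Spec_welcome html_text out) := by unfold Spec_welcome; infer_instance

-- ===== CLAIM (what is proved, stated in full; the proofs are below) =====
def Claim_equal_welcome : Prop := ∀ (html_text : String), Dom_welcome html_text → Spec_welcome html_text (welcome html_text)

-- ===== LEMMAS AND PROOFS =====

theorem pvSplitNl_ne_nil (cs : List Char) : pvSplitNl cs ≠ [] := by
  induction cs with
  | nil => simp [pvSplitNl]
  | cons c cs ih =>
      simp only [pvSplitNl]
      split
      · simp
      · cases h : pvSplitNl cs <;> simp

theorem pvJoinBr_cons_append (s l : List Char) (ls : List (List Char)) :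
    pvJoinBr ((s ++ l) :: ls) = s ++ pvJoinBr (l :: ls) := by
  cases ls <;> simp [pvJoinBr]

theorem pvGoA_eq (cs : List Char) : ∀ idx, pvGoA idx cs = pvJoinBr (pvLinesB idx (pvSplitNl cs)) := by
  induction cs with
  | nil => intro idx; simp [pvGoA, pvSplitNl, pvLinesB, pvLineB, pvJoinBr]
  | cons c cs ih =>
      intro idx
      by_cases h : c = '\n'
      · subst h
        have hne := pvSplitNl_ne_nil cs
        cases hsp : pvSplitNl cs with
        | nil => exact absurd hsp hne
        | cons l ls =>
            simp only [pvGoA, pvSplitNl, reduceIte]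
            rw [ih idx, hsp]
            simp [pvLinesB, pvLineB, pvJoinBr]
      · have hne := pvSplitNl_ne_nil cs
        cases hsp : pvSplitNl cs with
        | nil => exact absurd hsp hne
        | cons l ls =>
            simp only [pvGoA, pvSplitNl, if_neg h, hsp]
            rw [ih (idx + 1), hsp]
            simp only [pvLinesB, pvLineB, List.length_cons]
            rw [pvJoinBr_cons_append, show idx + (l.length + 1) = idx + 1 + l.length by omega]
            rfl

-- ===== VERDICT (by name: the statement is the Claim_ definition above) =====
theorem welcome_spec : Claim_equal_welcome := by
  intro s _
  unfold Spec_welcome welcome welcome_alt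
  rw [pvGoA_eq]
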